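-- pv_equiv track=rewrite | github.com/fangguanya/cocoindex | cpp_clang/analyzer/validation_engine.py | _is_known_system_namespace
-- ===== SOURCE A (Python) =====
-- def _is_known_system_namespace(namespace_name: str) -> bool:
--     """检查是否为已知的系统命名空间"""
--     system_namespaces = [
--         'std', '__gnu_cxx', '__cxxabiv1',  # C++标准库和编译器扩展
--     ]
--
--     for sys_ns in system_namespaces:
--         if namespace_name == sys_ns or namespace_name.startswith(sys_ns + '::'):
--             return True
--
--     return False
-- ===== SOURCE B (Python) =====
-- _SYSTEM_NS_ROOTS = frozenset({'std', '__gnu_cxx', '__cxxabiv1'})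
--
--
-- def _is_known_system_namespace(namespace_name: str) -> bool:
--     """检查是否为已知的系统命名空间"""
--     head = namespace_name.split('::', 1)[0]
--     return head in _SYSTEM_NS_ROOTS
-- ===== Notes on version B (the rewrite author's own statement) =====
-- stated objective: idiomatic
-- what changed: Instead of scanning the candidate list and testing each root with == or startswith, B parses the input once into its leading '::'-delimited segment and does a single set-membership test on it.
import Mathlib
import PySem

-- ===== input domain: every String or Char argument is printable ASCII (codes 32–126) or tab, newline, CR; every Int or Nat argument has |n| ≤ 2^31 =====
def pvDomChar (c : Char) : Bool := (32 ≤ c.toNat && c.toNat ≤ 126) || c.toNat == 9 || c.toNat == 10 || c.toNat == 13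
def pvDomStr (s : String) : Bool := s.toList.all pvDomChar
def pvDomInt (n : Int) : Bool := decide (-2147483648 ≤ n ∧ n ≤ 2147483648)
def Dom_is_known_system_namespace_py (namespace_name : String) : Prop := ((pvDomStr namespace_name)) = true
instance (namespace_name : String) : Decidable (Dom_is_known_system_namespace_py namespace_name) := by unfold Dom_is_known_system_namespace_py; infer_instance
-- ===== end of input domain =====

-- B is idiomatic: it parses the input once into its leading '::'-delimited segment and
-- does one set-membership test, instead of A's per-candidate ==/startswith scan.

-- ===== PORT A =====
-- for-loop with early `return True` over the candidate list = List.any over the same list,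
-- same test in the same order (== first, then startswith(sys_ns + '::')).
def is_known_system_namespace_py (namespace_name : String) : Bool :=
  let system_namespaces : List String := ["std", "__gnu_cxx", "__cxxabiv1"]
  system_namespaces.any (fun sys_ns =>
    namespace_name == sys_ns || PySem.Str.startswith namespace_name (sys_ns ++ "::"))

-- ===== PORT B =====
-- head = namespace_name.split('::', 1)[0]  (split never returns an empty list, so [0] is safe;
-- sep "::" is nonempty, so splitMax? is `some`); `head in frozenset{...}` = membership in the set.
def is_known_system_namespace_py_alt (namespace_name : String) : Bool :=
  let head : String := (((PySem.Str.splitMax? namespace_name "::" 1).getD []).headD "")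
  (PySem.Set.ofList ["std", "__gnu_cxx", "__cxxabiv1"]).contains head

-- ===== PRECONDITION & SPEC =====
def Spec_is_known_system_namespace_py (namespace_name : String) (out : Bool) : Prop := out = is_known_system_namespace_py_alt namespace_name
instance (namespace_name : String) (out : Bool) : Decidable (Spec_is_known_system_namespace_py namespace_name out) := by unfold Spec_is_known_system_namespace_py; infer_instance

-- ===== CLAIM (what is proved, stated in full; the proofs are below) =====
def Claim_equal_is_known_system_namespace_py : Prop := ∀ (namespace_name : String), Dom_is_known_system_namespace_py namespace_name → Spec_is_known_system_namespace_py namespace_name (is_known_system_namespace_py namespace_name)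

-- ===== LEMMAS AND PROOFS =====

/-- The characters of `l` before the first occurrence of `sep` (all of `l` if none). -/
def headTo (sep : List Char) : List Char → List Char
  | [] => []
  | c :: rest => if sep.isPrefixOf (c :: rest) then [] else c :: headTo sep rest

/-- `splitOnMax.go` with `m = 0` returns the single remaining piece. -/
theorem go_zero (sep : List Char) (fuel : Nat) (l cur : List Char) (acc : List (List Char)) :
    PySem.Chars.splitOnMax.go sep fuel 0 l cur acc = ((cur.reverse ++ l) :: acc).reverse := by
  cases fuel with
  | zero => rfl
  | succ fuel => cases l with
    | nil => simp [PySem.Chars.splitOnMax.go]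
    | cons c rest => simp [PySem.Chars.splitOnMax.go]

/-- With `m = 1`, enough fuel and empty piece-accumulators, the first piece is `headTo sep l`. -/
theorem go_one_head (sep : List Char) (fuel : Nat) :
    ∀ (l cur : List Char), l.length ≤ fuel →
      ∃ tail, PySem.Chars.splitOnMax.go sep fuel 1 l cur [] = (cur.reverse ++ headTo sep l) :: tail := by
  induction fuel with
  | zero =>
    intro l cur hl
    have : l = [] := List.eq_nil_of_length_eq_zero (Nat.le_zero.mp hl)
    subst this
    exact ⟨[], by simp [PySem.Chars.splitOnMax.go, headTo]⟩
  | succ fuel ih =>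
    intro l cur hl
    cases l with
    | nil => exact ⟨[], by simp [PySem.Chars.splitOnMax.go, headTo]⟩
    | cons c rest =>
      by_cases hp : sep.isPrefixOf (c :: rest)
      · refine ⟨[List.drop sep.length (c :: rest)], ?_⟩
        simp [PySem.Chars.splitOnMax.go, hp, go_zero, headTo]
      · obtain ⟨tail, htail⟩ := ih rest (c :: cur) (by simpa using Nat.le_of_succ_le_succ hl)
        refine ⟨tail, ?_⟩
        simp only [PySem.Chars.splitOnMax.go, hp]
        simp only [if_neg (by omega : ¬ (1 : Nat) = 0), if_neg (by simpa using hp)]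
        rw [htail]
        simp [headTo, hp]

/-- B's `head` is exactly `headTo "::" namespace_name.toList`. -/
theorem alt_head_eq (n : String) :
    (((PySem.Str.splitMax? n "::" 1).getD []).headD "")
      = String.ofList (headTo [':', ':'] n.toList) := by
  obtain ⟨tail, htail⟩ := go_one_head [':', ':'] (n.length + 1) n.toList [] (by simp)
  simp [PySem.Str.splitMax?, PySem.Chars.splitMax?, PySem.Chars.splitOnMax]
  rw [htail]
  simp

/-- For a root containing no `':'`, the leading segment equals the root iff the whole string
is the root or starts with `root ++ "::"` — the two tests A performs. -/
theorem headTo_eq_iff (root : List Char) (hroot : ':' ∉ root) (cs : List Char) :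
    headTo [':', ':'] cs = root ↔ (cs = root ∨ root ++ [':', ':'] <+: cs) := by
  induction cs generalizing root with
  | nil =>
    simp only [headTo]
    constructor
    · intro h; exact Or.inl h
    · rintro (h | h)
      · exact h
      · exfalso; have := h.length_le; simp at this
  | cons c rest ih =>
    by_cases hp : List.isPrefixOf [':', ':'] (c :: rest)
    · have hpre : [':', ':'] <+: c :: rest := List.isPrefixOf_iff_prefix.mp hp
      have hc : (':' : Char) = c := (List.cons_prefix_cons.mp hpre).1
      simp only [headTo, if_pos hp]
      constructor
      · rintro rfl; exact Or.inr (by simpa using hpre)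
      · rintro (h | h)
        · exfalso; apply hroot; rw [← h, ← hc]; simp
        · cases root with
          | nil => rfl
          | cons r rt =>
            exfalso
            have hr : r = c := (List.cons_prefix_cons.mp (by simpa using h)).1
            exact hroot (by simp [hr, ← hc])
    · have hnp : ¬ ([':', ':'] <+: c :: rest) :=
        fun h => hp (List.isPrefixOf_iff_prefix.mpr h)
      simp only [headTo, if_neg hp]
      cases root with
      | nil =>
        simp only [List.nil_append]
        constructor
        · intro h; simp at h
        · rintro (h | h)
          · exact absurd h (by simp)
          · exact absurd h hnp
      | cons r rt =>
        have hrt : ':' ∉ rt := fun h => hroot (List.mem_cons_of_mem _ h)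
        rw [List.cons_append, List.cons_prefix_cons]
        constructor
        · intro h
          obtain ⟨hc, hrest⟩ := List.cons.inj h
          rcases (ih rt hrt).mp hrest with h1 | h1
          · exact Or.inl (by rw [hc, h1])
          · exact Or.inr ⟨hc.symm, h1⟩
        · rintro (h | ⟨hc, h⟩)
          · obtain ⟨hc, hrest⟩ := List.cons.inj h
            rw [hc, (ih rt hrt).mpr (Or.inl hrest)]
          · rw [hc, (ih rt hrt).mpr (Or.inr h)]

/-- One A-disjunct equals the corresponding B membership test. -/
theorem disjunct_eq (n root : String) (hroot : ':' ∉ root.toList) :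
    (n == root || PySem.Str.startswith n (root ++ "::"))
      = (String.ofList (headTo [':', ':'] n.toList) == root) := by
  rw [Bool.eq_iff_iff]
  simp only [Bool.or_eq_true, beq_iff_eq, PySem.Str.startswith_eq, PySem.Chars.startswith_iff]
  have hsep : (root ++ "::").toList = root.toList ++ [':', ':'] := by
    rw [String.toList_append]; rfl
  rw [hsep]
  have key : headTo [':', ':'] n.toList = root.toList
      ↔ (n.toList = root.toList ∨ root.toList ++ [':', ':'] <+: n.toList) :=
    headTo_eq_iff root.toList hroot n.toList
  constructor
  · rintro (rfl | h)
    · exact String.toList_inj.mp (by rw [String.toList_ofList, key.mpr (Or.inl rfl)])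
    · exact String.toList_inj.mp (by rw [String.toList_ofList, key.mpr (Or.inr h)])
  · intro h
    have h2 : headTo [':', ':'] n.toList = root.toList := by
      rw [← String.toList_ofList (l := headTo [':', ':'] n.toList), h]
    rcases key.mp h2 with h3 | h3
    · exact Or.inl (String.toList_inj.mp h3)
    · exact Or.inr h3

-- ===== VERDICT (by name: the statement is the Claim_ definition above) =====
theorem is_known_system_namespace_py_spec : Claim_equal_is_known_system_namespace_py := by
  intro n _
  unfold Spec_is_known_system_namespace_py is_known_system_namespace_py is_known_system_namespace_py_alt
  rw [alt_head_eq]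
  rw [show PySem.Set.ofList ["std", "__gnu_cxx", "__cxxabiv1"]
        = ["std", "__gnu_cxx", "__cxxabiv1"] by decide]
  simp only [List.any_cons, List.any_nil, Bool.or_false]
  rw [disjunct_eq n "std" (by decide), disjunct_eq n "__gnu_cxx" (by decide),
      disjunct_eq n "__cxxabiv1" (by decide)]
  rw [Bool.eq_iff_iff]
  simp [PySem.Set.contains]
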